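-- pv_equiv track=rewrite | github.com/BetterSaas-engg/Garabyte-Privacy | backend/app/services/jurisdictions.py | regulation_applies_to
-- ===== SOURCE A (Python) =====
-- from typing import Iterable, Optional
--
-- REGULATION_JURISDICTIONS: dict[str, list[str]] = {
--     "PIPEDA": ["CA"],
--     "Quebec Law 25": ["CA-QC"],
--     "CASL": ["CA"],
--     "GDPR": ["EU"],
--     "CCPA": ["US-CA"],
--     "AIDA": ["CA"],
-- }
--
-- def regulation_applies_to(
--     regulation_name: str,
--     tenant_codes: Optional[Iterable[str]],
-- ) -> bool:
--     """
--     Return True if the regulation should be cited for a tenant whose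
--     jurisdiction_codes is `tenant_codes`. Sub-national codes (CA-QC)
--     inherit federal codes (CA): a Quebec-based tenant matches both
--     PIPEDA (federal) and Law 25 (provincial).
--
--     Empty/null tenant_codes -> True (no filtering yet; show everything).
--     Unknown regulation -> True (preserves existing behavior for citations
--     we haven't mapped).
--     """
--     if not tenant_codes:
--         return True
--     reg_codes = REGULATION_JURISDICTIONS.get(regulation_name)
--     if reg_codes is None:
--         return True
--     tenant_set = set()
--     for code in tenant_codes:
--         tenant_set.add(code)
--         # Sub-national to federal: CA-QC implies CA
--         if "-" in code:
--             tenant_set.add(code.split("-", 1)[0])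
--     return any(c in tenant_set for c in reg_codes)
-- ===== SOURCE B (Python) =====
-- from typing import Iterable, Optional
--
-- REGULATION_JURISDICTIONS: dict[str, list[str]] = {
--     "PIPEDA": ["CA"],
--     "Quebec Law 25": ["CA-QC"],
--     "CASL": ["CA"],
--     "GDPR": ["EU"],
--     "CCPA": ["US-CA"],
--     "AIDA": ["CA"],
-- }
--
-- def regulation_applies_to(
--     regulation_name: str,
--     tenant_codes: Optional[Iterable[str]],
-- ) -> bool:
--     # Reverse-index strategy: instead of expanding every tenant code into a
--     # membership set and scanning the regulation's codes against it, index the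
--     # regulation's codes once and make a single recursive early-exit pass over
--     # the tenant codes, asking for each tenant code whether it (or its federal
--     # prefix) hits the index.
--     codes = list(tenant_codes) if tenant_codes is not None else []
--     if not codes:
--         return True
--     reg_codes = REGULATION_JURISDICTIONS.get(regulation_name)
--     if reg_codes is None:
--         return True
--     targets = frozenset(reg_codes)
--     for head in codes:
--         if head in targets:
--             return True
--         if "-" in head and head.split("-", 1)[0] in targets:
--             return True
--     return False
-- ===== Notes on version B (the rewrite author's own statement) =====
-- stated objective: alternative
-- what changed: Reversed the lookup direction and the pipeline: A expands every tenant code (plus federal prefix) into a membership set and then scans the regulation's codes against it; B indexes the regulation's codes once and makes a single early-exit pass over the tenant codes, testing each code and its federal prefix against that index.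
import Mathlib
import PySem

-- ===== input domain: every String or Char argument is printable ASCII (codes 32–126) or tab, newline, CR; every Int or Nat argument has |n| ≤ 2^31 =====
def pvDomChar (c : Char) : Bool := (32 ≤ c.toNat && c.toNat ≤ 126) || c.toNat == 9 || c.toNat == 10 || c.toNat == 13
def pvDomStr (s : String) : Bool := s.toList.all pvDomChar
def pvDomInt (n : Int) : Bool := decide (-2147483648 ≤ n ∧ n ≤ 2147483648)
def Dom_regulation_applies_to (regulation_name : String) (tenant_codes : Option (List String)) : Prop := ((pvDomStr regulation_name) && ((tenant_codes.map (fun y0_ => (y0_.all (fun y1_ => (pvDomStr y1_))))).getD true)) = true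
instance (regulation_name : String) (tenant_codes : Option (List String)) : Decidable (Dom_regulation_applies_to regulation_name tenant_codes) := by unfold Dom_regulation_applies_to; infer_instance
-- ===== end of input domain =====

-- B reverses the pipeline: it indexes the regulation's codes once and makes a single
-- early-exit pass over the tenant codes (code or federal prefix hits the
-- index), instead of A's expanded tenant set scanned by the regulation codes;
-- objective: alternative.

-- shared module constant (same in both Pythons)
def REGULATION_JURISDICTIONS : PySem.Dict String (List String) :=
  PySem.Dict.ofList
    [("PIPEDA", ["CA"]), ("Quebec Law 25", ["CA-QC"]), ("CASL", ["CA"]),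
     ("GDPR", ["EU"]), ("CCPA", ["US-CA"]), ("AIDA", ["CA"])]

-- code.split("-", 1)[0]  (both Pythons use this expression)
def pvFedPrefix (t : String) : String :=
  ((PySem.Str.splitMax? t "-" 1).getD []).headD ""

-- ===== PORT A =====
-- one iteration of A's 'for code in tenant_codes' loop building tenant_set
def pvExpandStep (s : PySem.Set String) (code : String) : PySem.Set String :=
  let s1 := PySem.Set.add s code
  if PySem.Str.isIn "-" code then PySem.Set.add s1 (pvFedPrefix code) else s1

def regulation_applies_to (regulation_name : String) (tenant_codes : Option (List String)) : Bool :=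
  match tenant_codes with
  | none => true
  | some codes =>
    if codes.isEmpty then true
    else
      match REGULATION_JURISDICTIONS.get? regulation_name with
      | none => true
      | some reg_codes =>
        let tenant_set := codes.foldl pvExpandStep PySem.Set.empty
        reg_codes.any (fun c => PySem.Set.contains tenant_set c)

-- ===== PORT B =====
-- Source B's early-exit 'for head in codes' loop over the tenant codes
def pvCovered (targets : PySem.Set String) : List String → Bool
  | [] => false
  | head :: tail =>
    if PySem.Set.contains targets head then true
    else if PySem.Str.isIn "-" head && PySem.Set.contains targets (pvFedPrefix head) then true
    else pvCovered targets tail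

def regulation_applies_to_alt (regulation_name : String) (tenant_codes : Option (List String)) : Bool :=
  let codes := tenant_codes.getD []
  if codes.isEmpty then true
  else
    match REGULATION_JURISDICTIONS.get? regulation_name with
    | none => true
    | some reg_codes =>
      let targets := PySem.Set.ofList reg_codes
      pvCovered targets codes

-- ===== PRECONDITION & SPEC =====
def Spec_regulation_applies_to (regulation_name : String) (tenant_codes : Option (List String)) (out : Bool) : Prop := out = regulation_applies_to_alt regulation_name tenant_codes
instance (regulation_name : String) (tenant_codes : Option (List String)) (out : Bool) : Decidable (Spec_regulation_applies_to regulation_name tenant_codes out) := by unfold Spec_regulation_applies_to; infer_instance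

-- ===== CLAIM (what is proved, stated in full; the proofs are below) =====
def Claim_equal_regulation_applies_to : Prop := ∀ (regulation_name : String) (tenant_codes : Option (List String)), Dom_regulation_applies_to regulation_name tenant_codes → Spec_regulation_applies_to regulation_name tenant_codes (regulation_applies_to regulation_name tenant_codes)

-- ===== LEMMAS AND PROOFS =====

-- membership in A's expanded tenant set, by induction on the loop
theorem mem_foldl_expand (codes : List String) (s : PySem.Set String) (x : String) :
    x ∈ codes.foldl pvExpandStep s ↔
      x ∈ s ∨ ∃ t ∈ codes, x = t ∨ (PySem.Str.isIn "-" t = true ∧ x = pvFedPrefix t) := by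
  induction codes generalizing s with
  | nil => simp
  | cons c cs ih =>
    simp only [List.foldl_cons, ih, pvExpandStep, List.mem_cons]
    split <;> rename_i h <;> simp [PySem.Set.mem_add] <;> aesop

-- B's early-exit pass characterised as an existential over the tenant codes
theorem pvCovered_iff (targets : PySem.Set String) (codes : List String) :
    pvCovered targets codes = true ↔
      ∃ t ∈ codes, PySem.Set.contains targets t = true ∨
        (PySem.Str.isIn "-" t = true ∧ PySem.Set.contains targets (pvFedPrefix t) = true) := by
  induction codes with
  | nil => simp [pvCovered]
  | cons c cs ih =>
    simp only [pvCovered, List.mem_cons]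
    split_ifs with h1 h2
    · simp only [true_iff]
      exact ⟨c, Or.inl rfl, Or.inl h1⟩
    · simp only [Bool.and_eq_true] at h2
      aesop
    · simp only [Bool.and_eq_true] at h2
      rw [ih]
      aesop

-- A's set-based scan equals B's indexed early-exit pass
theorem scan_eq_covered (codes reg_codes : List String) :
    reg_codes.any (fun c => PySem.Set.contains (codes.foldl pvExpandStep PySem.Set.empty) c)
      = pvCovered (PySem.Set.ofList reg_codes) codes := by
  rw [Bool.eq_iff_iff, pvCovered_iff]
  simp only [List.any_eq_true, PySem.Set.contains, List.contains_iff_mem,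
    mem_foldl_expand, PySem.Set.mem_ofList, PySem.Set.empty]
  aesop

-- ===== VERDICT (by name: the statement is the Claim_ definition above) =====
theorem regulation_applies_to_spec : Claim_equal_regulation_applies_to := by
  intro regulation_name tenant_codes _
  unfold Spec_regulation_applies_to regulation_applies_to regulation_applies_to_alt
  match tenant_codes with
  | none => rfl
  | some codes =>
    simp only [Option.getD_some]
    by_cases h : codes.isEmpty <;> simp only [h, if_true]
    cases REGULATION_JURISDICTIONS.get? regulation_name with
    | none => rfl
    | some reg_codes => exact scan_eq_covered codes reg_codes
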